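-- pv_equiv track=rewrite | github.com/x32u/grief-cogs | modtools/modtools.py | count_months
-- ===== SOURCE A (Python) =====
-- import itertools
--
-- def count_months(days):
--     lens = [31, 28, 31, 30, 31, 30, 31, 31, 30, 31, 30, 31]
--     cy = itertools.cycle(lens)
--     months = 0
--     m_temp = 0
--     mo_len = next(cy)
--     for i in range(1, days + 1):
--         m_temp += 1
--         if m_temp == mo_len:
--             months += 1
--             m_temp = 0
--             mo_len = next(cy)
--             if mo_len == 28 and months >= 48:
--                 mo_len += 1
--
--     weeks, days = divmod(m_temp, 7)
--     return months, weeks, days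
-- ===== SOURCE B (Python) =====
-- # Arithmetic re-implementation: jump by whole years (365 days for the first 4
-- # years, 366 thereafter since A makes every February from month 48 on 29 days),
-- # then locate the month inside the year with a cumulative-sum table.
--
-- _CUM_REG = [0, 31, 59, 90, 120, 151, 181, 212, 243, 273, 304, 334, 365]
-- _CUM_LEAP = [0, 31, 60, 91, 121, 152, 182, 213, 244, 274, 305, 335, 366]
--
--
-- def count_months(days):
--     if days <= 0:
--         return 0, 0, 0
--     if days < 1460:
--         y, r = divmod(days, 365)
--         cum = _CUM_REG
--         base = 12 * y
--     else:
--         y, r = divmod(days - 1460, 366)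
--         cum = _CUM_LEAP
--         base = 48 + 12 * y
--     k = 0
--     while cum[k + 1] <= r:
--         k += 1
--     weeks, rem = divmod(r - cum[k], 7)
--     return base + k, weeks, rem
-- ===== Notes on version B (the rewrite author's own statement) =====
-- stated objective: faster
-- what changed: B replaces A's day-by-day simulation with O(1) arithmetic: whole years are jumped by division (365-day years for the first 4 years, 366 thereafter since A's rule makes every February from month 48 on 29 days), and the month inside the year is found in a fixed cumulative-sum table.
import Mathlib
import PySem

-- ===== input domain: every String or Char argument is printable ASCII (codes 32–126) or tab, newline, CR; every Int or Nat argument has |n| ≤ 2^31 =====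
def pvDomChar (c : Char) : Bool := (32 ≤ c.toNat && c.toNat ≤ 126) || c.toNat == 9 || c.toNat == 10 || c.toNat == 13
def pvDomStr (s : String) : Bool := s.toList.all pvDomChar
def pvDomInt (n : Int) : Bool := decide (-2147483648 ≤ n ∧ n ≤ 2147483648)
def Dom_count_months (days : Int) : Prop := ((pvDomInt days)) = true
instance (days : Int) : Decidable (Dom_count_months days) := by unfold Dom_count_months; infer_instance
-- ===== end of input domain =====

set_option maxRecDepth 8000


-- B replaces A's O(days) day-by-day simulation with O(1) year/month arithmetic over cumulative-sum tables.

-- ===== PORT A =====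
def cmLens : List Int := [31, 28, 31, 30, 31, 30, 31, 31, 30, 31, 30, 31]

-- one iteration of A's for-loop; the itertools.cycle is modelled by the index idx
-- of the NEXT element it will yield (next(cy) = cmLens[idx % 12], idx += 1), which is exact
def cmStep (s : Int × Int × Int × Nat) (_i : Int) : Int × Int × Int × Nat :=
  match s with
  | (months, m_temp, mo_len, idx) =>
    let m_temp := m_temp + 1
    if m_temp = mo_len then
      let months := months + 1
      let mo_len2 := cmLens.getD (idx % 12) 0
      let mo_len3 := if mo_len2 = 28 ∧ 48 ≤ months then mo_len2 + 1 else mo_len2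
      (months, (0 : Int), mo_len3, idx + 1)
    else
      (months, m_temp, mo_len, idx)

def count_months (days : Int) : Int × Int × Int :=
  -- months = 0, m_temp = 0, mo_len = next(cy) = 31 (cycle now at position 1)
  let s := (PySem.List.pyRange 1 (days + 1) 1).foldl cmStep (0, 0, 31, 1)
  (s.1, PySem.Int.floordiv s.2.1 7, PySem.Int.mod s.2.1 7)

-- ===== PORT B =====
def cmCumReg : List Int := [0, 31, 59, 90, 120, 151, 181, 212, 243, 273, 304, 334, 365]
def cmCumLeap : List Int := [0, 31, 60, 91, 121, 152, 182, 213, 244, 274, 305, 335, 366]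

-- Source B's `while cum[k+1] <= r: k += 1`; the k < 11 guard only makes the recursion total
-- (Python's r is always < cum[12], so the loop never moves past k = 11 either)
def cmFindK (cum : List Int) (r : Int) (k : Nat) : Nat :=
  if _h : k < 11 then
    if cum.getD (k + 1) 0 ≤ r then cmFindK cum r (k + 1) else k
  else k
termination_by 11 - k

def cmFinish (cum : List Int) (r base : Int) : Int × Int × Int :=
  let k := cmFindK cum r 0
  let mt := r - cum.getD k 0
  (base + (k : Int), PySem.Int.floordiv mt 7, PySem.Int.mod mt 7)

def count_months_alt (days : Int) : Int × Int × Int :=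
  if days ≤ 0 then (0, 0, 0)
  else if days < 1460 then
    cmFinish cmCumReg (PySem.Int.mod days 365) (12 * PySem.Int.floordiv days 365)
  else
    cmFinish cmCumLeap (PySem.Int.mod (days - 1460) 366)
      (48 + 12 * PySem.Int.floordiv (days - 1460) 366)

-- ===== PRECONDITION & SPEC =====
def Spec_count_months (days : Int) (out : Int × Int × Int) : Prop := out = count_months_alt days
instance (days : Int) (out : Int × Int × Int) : Decidable (Spec_count_months days out) := by unfold Spec_count_months; infer_instance

-- ===== CLAIM (what is proved, stated in full; the proofs are below) =====
def Claim_equal_count_months : Prop := ∀ (days : Int), Dom_count_months days → Spec_count_months days (count_months days)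

-- ===== LEMMAS AND PROOFS =====

-- length of month m in A's calendar: cmLens cycles, February is 29 from month 48 on
def cmL (m : Nat) : Int :=
  if cmLens.getD (m % 12) 0 = 28 ∧ 48 ≤ m then cmLens.getD (m % 12) 0 + 1
  else cmLens.getD (m % 12) 0

-- cumulative day count before month m
def cmC : Nat → Int
  | 0 => 0
  | m + 1 => cmC m + cmL m

lemma cmL_pos (m : Nat) : 0 < cmL m := by
  have h : m % 12 = 0 ∨ m % 12 = 1 ∨ m % 12 = 2 ∨ m % 12 = 3 ∨ m % 12 = 4 ∨ m % 12 = 5 ∨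
      m % 12 = 6 ∨ m % 12 = 7 ∨ m % 12 = 8 ∨ m % 12 = 9 ∨ m % 12 = 10 ∨ m % 12 = 11 := by omega
  rcases h with h|h|h|h|h|h|h|h|h|h|h|h <;> simp [cmL, cmLens, h] <;> split_ifs <;> norm_num

lemma cmC_mono {a b : Nat} (h : a ≤ b) : cmC a ≤ cmC b := by
  induction b with
  | zero => simp [Nat.le_zero.mp h]
  | succ b ih =>
    rcases Nat.lt_or_ge a (b + 1) with h' | h'
    · have := cmL_pos b
      have := ih (by omega)
      show cmC a ≤ cmC b + cmL b
      omega
    · have : a = b + 1 := by omega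
      simp [this]

lemma cm_bracket_uniq {n : Int} {M M' : Nat}
    (h1 : cmC M ≤ n) (h2 : n < cmC (M + 1)) (h3 : cmC M' ≤ n) (h4 : n < cmC (M' + 1)) :
    M = M' := by
  rcases Nat.lt_trichotomy M M' with h | h | h
  · have := cmC_mono (show M + 1 ≤ M' by omega); omega
  · exact h
  · have := cmC_mono (show M' + 1 ≤ M by omega); omega

lemma cmL_per (m : Nat) (h : 48 ≤ m) : cmL (m + 12) = cmL m := by
  by_cases hb : cmLens.getD (m % 12) 0 = 28 <;>
    simp [cmL, Nat.add_mod_right, h, show 48 ≤ m + 12 by omega]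

lemma cmCg (j : Nat) : cmC (48 + j + 12) = cmC (48 + j) + 366 := by
  induction j with
  | zero => decide
  | succ j ih =>
    have e1 : cmC (48 + (j + 1) + 12) = cmC (48 + j + 12) + cmL (48 + j + 12) := rfl
    have e2 : cmC (48 + (j + 1)) = cmC (48 + j) + cmL (48 + j) := rfl
    rw [e1, e2, cmL_per _ (by omega), ih]; ring

lemma cmChigh (y j : Nat) : cmC (48 + 12 * y + j) = cmC (48 + j) + 366 * (y : Int) := by
  induction y with
  | zero => norm_num
  | succ y ih =>
    have e : 48 + 12 * (y + 1) + j = 48 + (12 * y + j) + 12 := by ring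
    have e' : 48 + 12 * y + j = 48 + (12 * y + j) := by ring
    rw [e, cmCg (12 * y + j), ← e', ih]; push_cast; ring

lemma cmClow : ∀ m : Nat, m ≤ 48 →
    cmC m = 365 * ((m / 12 : Nat) : Int) + cmCumReg.getD (m % 12) 0 := by decide

lemma cmCleapBase : ∀ j : Nat, j ≤ 12 → cmC (48 + j) = 1460 + cmCumLeap.getD j 0 := by decide

-- the state of A's loop after n days, on the range it actually folds over
def cmState (n : Nat) : Int × Int × Int × Nat :=
  (PySem.List.pyRange 1 ((n : Int) + 1) 1).foldl cmStep (0, 0, 31, 1)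

lemma cmState_succ (n : Nat) : cmState (n + 1) = cmStep (cmState n) ((n : Int) + 1) := by
  unfold cmState
  have h : ((n + 1 : Nat) : Int) + 1 = ((n : Int) + 1) + 1 := by push_cast; ring
  rw [h, PySem.List.pyRange_one_succ_right (by omega : (1 : Int) ≤ (n : Int) + 1),
    List.foldl_append]
  rfl

-- the fetched-and-adjusted month length in cmStep is exactly cmL
lemma cmL_int (M : Nat) :
    (if cmLens.getD (M % 12) 0 = 28 ∧ (48 : Int) ≤ (M : Int) then cmLens.getD (M % 12) 0 + 1
     else cmLens.getD (M % 12) 0) = cmL M := by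
  unfold cmL
  by_cases hb : cmLens.getD (M % 12) 0 = 28 <;> by_cases hc : 48 ≤ M <;>
    simp [hc, show ((48 : Int) ≤ (M : Int)) ↔ 48 ≤ M by exact_mod_cast Iff.rfl]

-- invariant of A's loop: after n days it sits in the unique month M with cmC M ≤ n < cmC (M+1)
lemma cmLoopA (n : Nat) : ∃ M : Nat, cmC M ≤ (n : Int) ∧ (n : Int) < cmC (M + 1) ∧
    cmState n = ((M : Int), (n : Int) - cmC M, cmL M, M + 1) := by
  induction n with
  | zero =>
    refine ⟨0, by simp [cmC], by simp [cmC, cmL, cmLens], ?_⟩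
    unfold cmState
    rw [PySem.List.pyRange_one_eq_nil (by norm_num)]
    simp [cmC, cmL, cmLens]
  | succ n ih =>
    obtain ⟨M, h1, h2, hs⟩ := ih
    have hC1 : cmC (M + 1) = cmC M + cmL M := rfl
    rw [cmState_succ, hs]
    by_cases h : (n : Int) - cmC M + 1 = cmL M
    · refine ⟨M + 1, by push_cast; omega, ?_, ?_⟩
      · have hC2 : cmC (M + 1 + 1) = cmC (M + 1) + cmL (M + 1) := rfl
        have := cmL_pos (M + 1)
        push_cast; omega
      · show cmStep ((M : Int), (n : Int) - cmC M, cmL M, M + 1) ((n : Int) + 1) = _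
        unfold cmStep
        simp only [if_pos h]
        have hcast : (M : Int) + 1 = ((M + 1 : Nat) : Int) := by push_cast; ring
        rw [hcast, cmL_int (M + 1)]
        refine Prod.ext rfl (Prod.ext ?_ rfl)
        show (0 : Int) = ((n : Nat) + 1 : Nat) - cmC (M + 1)
        push_cast; omega
    · refine ⟨M, by push_cast; omega, ?_, ?_⟩
      · have hne : ((n : Int) + 1) ≠ cmC (M + 1) := by
          intro he; exact h (by omega)
        push_cast; omega
      · show cmStep ((M : Int), (n : Int) - cmC M, cmL M, M + 1) ((n : Int) + 1) = _
        unfold cmStep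
        simp only [if_neg h]
        refine Prod.ext rfl (Prod.ext ?_ rfl)
        show (n : Int) - cmC M + 1 = ((n : Nat) + 1 : Nat) - cmC M
        push_cast; ring

-- Source B's while-loop: result bracket
lemma cmFindK_spec : ∀ (d k : Nat) (cum : List Int) (r : Int), k + d = 11 →
    cum.getD k 0 ≤ r →
    cmFindK cum r k ≤ 11 ∧ cum.getD (cmFindK cum r k) 0 ≤ r ∧
      (r < cum.getD (cmFindK cum r k + 1) 0 ∨ cmFindK cum r k = 11) := by
  intro d
  induction d with
  | zero =>
    intro k cum r hk hle
    have : k = 11 := by omega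
    subst this
    rw [cmFindK]
    rw [dif_neg (by omega : ¬ (11 : Nat) < 11)]
    exact ⟨le_refl _, hle, Or.inr rfl⟩
  | succ d ih =>
    intro k cum r hk hle
    rw [cmFindK]
    rw [dif_pos (show k < 11 by omega)]
    by_cases h : cum.getD (k + 1) 0 ≤ r
    · rw [if_pos h]; exact ih (k + 1) cum r (by omega) h
    · rw [if_neg h]
      exact ⟨by omega, hle, Or.inl (by omega)⟩

-- B's result characterised by the same bracket
lemma cmB_char (days : Int) (n : Nat) (hn : days = (n : Int)) (hpos : 0 < days) :
    ∃ M : Nat, cmC M ≤ (n : Int) ∧ (n : Int) < cmC (M + 1) ∧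
      count_months_alt days = ((M : Int), PySem.Int.floordiv ((n : Int) - cmC M) 7,
        PySem.Int.mod ((n : Int) - cmC M) 7) := by
  have h0 : ¬ days ≤ 0 := by omega
  unfold count_months_alt
  rw [if_neg h0]
  by_cases hlt : days < 1460
  · rw [if_pos hlt]
    have hy : PySem.Int.floordiv days 365 = ((n / 365 : Nat) : Int) := by
      rw [hn]; exact_mod_cast PySem.Int.floordiv_natCast n 365
    have hr : PySem.Int.mod days 365 = ((n % 365 : Nat) : Int) := by
      rw [hn]; exact_mod_cast PySem.Int.mod_natCast n 365
    set y := n / 365 with hy'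
    set r := n % 365 with hr'
    have hnlt : n < 1460 := by omega
    have hyr : n = 365 * y + r ∧ r < 365 ∧ y ≤ 3 := by omega
    obtain ⟨hk1, hk2, hk3⟩ := cmFindK_spec 11 0 cmCumReg (r : Int) rfl
      (by norm_num [cmCumReg])
    set k := cmFindK cmCumReg (r : Int) 0 with hk'
    have hub : (r : Int) < cmCumReg.getD (k + 1) 0 := by
      rcases hk3 with h | h
      · exact h
      · rw [h]
        norm_num [cmCumReg]
        exact_mod_cast hyr.2.1
    have hc1 : cmC (12 * y + k) = 365 * (y : Int) + cmCumReg.getD k 0 := by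
      have h := cmClow (12 * y + k) (by omega)
      rwa [show (12 * y + k) / 12 = y by omega, show (12 * y + k) % 12 = k by omega] at h
    have hn' : (n : Int) = 365 * (y : Int) + (r : Int) := by
      push_cast; omega
    have hc2 : cmC (12 * y + k + 1) = 365 * (y : Int) + cmCumReg.getD (k + 1) 0 := by
      rcases Nat.lt_or_ge k 11 with hlt11 | h11
      · have h := cmClow (12 * y + k + 1) (by omega)
        rwa [show (12 * y + k + 1) / 12 = y by omega,
          show (12 * y + k + 1) % 12 = k + 1 by omega] at h
      · have hk11 : k = 11 := by omega
        rw [hk11]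
        have h := cmClow (12 * y + 11 + 1) (by omega)
        rw [show (12 * y + 11 + 1) / 12 = y + 1 by omega,
          show (12 * y + 11 + 1) % 12 = 0 by omega] at h
        rw [h]; norm_num [cmCumReg]; push_cast; ring
    refine ⟨12 * y + k, ?_, ?_, ?_⟩
    · rw [hc1, hn']; linarith
    · rw [hc2, hn']; linarith
    · rw [hy, hr]
      have harg : (n : Int) - cmC (12 * y + k) = (r : Int) - cmCumReg.getD k 0 := by
        rw [hc1, hn']; ring
      rw [show cmFinish cmCumReg (r : Int) (12 * ((y : Nat) : Int)) =
          (12 * ((y : Nat) : Int) + (k : Int),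
            PySem.Int.floordiv ((r : Int) - cmCumReg.getD k 0) 7,
            PySem.Int.mod ((r : Int) - cmCumReg.getD k 0) 7) from rfl, harg]
      refine Prod.ext ?_ rfl
      push_cast; ring
  · rw [if_neg hlt]
    have h1460 : 1460 ≤ n := by omega
    have hd : days - 1460 = ((n - 1460 : Nat) : Int) := by
      rw [hn]; push_cast [h1460]; ring
    have hy : PySem.Int.floordiv (days - 1460) 366 = (((n - 1460) / 366 : Nat) : Int) := by
      rw [hd]; exact_mod_cast PySem.Int.floordiv_natCast (n - 1460) 366
    have hr : PySem.Int.mod (days - 1460) 366 = (((n - 1460) % 366 : Nat) : Int) := by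
      rw [hd]; exact_mod_cast PySem.Int.mod_natCast (n - 1460) 366
    set y := (n - 1460) / 366 with hy'
    set r := (n - 1460) % 366 with hr'
    have hyr : n = 1460 + 366 * y + r ∧ r < 366 := by omega
    obtain ⟨hk1, hk2, hk3⟩ := cmFindK_spec 11 0 cmCumLeap (r : Int) rfl
      (by norm_num [cmCumLeap])
    set k := cmFindK cmCumLeap (r : Int) 0 with hk'
    have hub : (r : Int) < cmCumLeap.getD (k + 1) 0 := by
      rcases hk3 with h | h
      · exact h
      · rw [h]
        norm_num [cmCumLeap]
        exact_mod_cast hyr.2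
    have hc1 : cmC (48 + 12 * y + k) = 1460 + cmCumLeap.getD k 0 + 366 * (y : Int) := by
      rw [cmChigh y k, cmCleapBase k (by omega)]
    have hn' : (n : Int) = 1460 + 366 * (y : Int) + (r : Int) := by
      push_cast; omega
    have hc2 : cmC (48 + 12 * y + k + 1) = 1460 + cmCumLeap.getD (k + 1) 0 + 366 * (y : Int) := by
      rcases Nat.lt_or_ge k 11 with hlt11 | h11
      · rw [show 48 + 12 * y + k + 1 = 48 + 12 * y + (k + 1) by omega,
          cmChigh y (k + 1), cmCleapBase (k + 1) (by omega)]
      · have hk11 : k = 11 := by omega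
        rw [hk11]
        rw [show 48 + 12 * y + 11 + 1 = 48 + 12 * (y + 1) + 0 by omega,
          cmChigh (y + 1) 0, cmCleapBase 0 (by omega)]
        norm_num [cmCumLeap]
        push_cast; ring
    refine ⟨48 + 12 * y + k, ?_, ?_, ?_⟩
    · rw [hc1, hn']; linarith
    · rw [hc2, hn']; linarith
    · rw [hy, hr]
      have harg : (n : Int) - cmC (48 + 12 * y + k) = (r : Int) - cmCumLeap.getD k 0 := by
        rw [hc1, hn']; ring
      rw [show cmFinish cmCumLeap (r : Int) (48 + 12 * ((y : Nat) : Int)) =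
          (48 + 12 * ((y : Nat) : Int) + (k : Int),
            PySem.Int.floordiv ((r : Int) - cmCumLeap.getD k 0) 7,
            PySem.Int.mod ((r : Int) - cmCumLeap.getD k 0) 7) from rfl, harg]
      refine Prod.ext ?_ rfl
      push_cast; ring

-- ===== VERDICT (by name: the statement is the Claim_ definition above) =====
theorem count_months_spec : Claim_equal_count_months := by
  unfold Claim_equal_count_months
  intro days _
  unfold Spec_count_months
  by_cases hneg : days ≤ 0
  · -- A's range is empty, both return (0, 0, 0)
    unfold count_months count_months_alt
    rw [PySem.List.pyRange_one_eq_nil (by omega), if_pos hneg]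
    simp [PySem.Int.floordiv, PySem.Int.mod]
  · rw [Int.not_le] at hneg
    obtain ⟨n, hn⟩ : ∃ n : Nat, days = (n : Int) :=
      ⟨days.toNat, (Int.toNat_of_nonneg (by omega)).symm⟩
    obtain ⟨M, h1, h2, hs⟩ := cmLoopA n
    obtain ⟨M', h1', h2', hB⟩ := cmB_char days n hn hneg
    have hMM : M = M' := cm_bracket_uniq h1 h2 h1' h2'
    subst hMM
    rw [hB]
    have hA : count_months days = ((M : Int), PySem.Int.floordiv ((n : Int) - cmC M) 7,
        PySem.Int.mod ((n : Int) - cmC M) 7) := by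
      unfold count_months
      rw [hn]
      show ((cmState n).1, PySem.Int.floordiv (cmState n).2.1 7,
        PySem.Int.mod (cmState n).2.1 7) = _
      rw [hs]
    exact hA
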